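-- pv_equiv track=rewrite | github.com/mhewDai/112 | hw/hw8/hw8.py | isPreSquareNumber
-- ===== SOURCE A (Python) =====
-- def digitCount(n):
--     counter = 0
--     if n == 0:
--         return 1
--     while n > 0:
--         counter += 1
--         n //= 10
--     return counter
--
-- def isPreSquareNumber(n):
--     length = digitCount(n)
--     tempN = n
--     for i in range(1,length):
--         leftPart = n % 10 ** i
--         rightPart = tempN // 10 ** i
--         #checks the left part and the right part to see if the left is a square
--         if leftPart == rightPart**2:
--             return True
--     return False
-- ===== SOURCE B (Python) =====
-- def isPreSquareNumber(n):
--     # Enumerate candidate upper parts u instead of digit splits: n is a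
--     # pre-square number iff n == u * q + u*u for some u >= 1 and power of
--     # ten q > u*u (q supplies the lower slot holding u**2, leading zeros
--     # included).  For such u, u**3 < u*q = n - u*u < n, so u ranges only
--     # up to the cube root of n; q is forced to be (n - u*u) // u.
--     u = 1
--     while u * u * u < n:
--         sq = u * u
--         rem = n - sq
--         if rem % u == 0:
--             q = rem // u
--             if q > sq:
--                 while q > 1 and q % 10 == 0:
--                     q //= 10
--                 if q == 1:
--                     return True
--         u += 1
--     return False
-- ===== Notes on version B (the rewrite author's own statement) =====
-- stated objective: alternative
-- what changed: B does not enumerate digit splits at all: it enumerates candidate upper parts u up to the cube root of n and checks whether (n - u*u)/u is a power of ten larger than u*u, which holds iff n is the concatenation of u and u**2.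
import Mathlib
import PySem

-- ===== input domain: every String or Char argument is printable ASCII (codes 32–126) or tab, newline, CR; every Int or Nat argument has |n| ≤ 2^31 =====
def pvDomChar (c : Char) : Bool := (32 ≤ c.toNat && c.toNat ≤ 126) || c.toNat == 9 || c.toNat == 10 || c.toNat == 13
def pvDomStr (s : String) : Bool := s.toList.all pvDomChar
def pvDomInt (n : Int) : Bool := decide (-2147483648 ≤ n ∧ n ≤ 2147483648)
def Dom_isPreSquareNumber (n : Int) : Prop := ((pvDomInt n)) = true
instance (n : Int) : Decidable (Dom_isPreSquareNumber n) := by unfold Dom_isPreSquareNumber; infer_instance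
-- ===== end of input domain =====

-- B replaces A's enumeration of digit splits with an enumeration of candidate
-- upper parts u (u^3 < n), checking whether (n - u^2)/u is a power of ten
-- exceeding u^2; return values proved equal on all ints.

-- ===== PORT A =====
-- while n > 0: counter += 1; n //= 10   (counter returned; 0 iterations when n <= 0)
def pvDcLoop (n : Int) : Int :=
  if h : 0 < n then 1 + pvDcLoop (PySem.Int.floordiv n 10) else 0
termination_by n.toNat
decreasing_by
  rw [PySem.Int.floordiv_eq_ediv_of_pos (by norm_num)]
  omega

def digitCount (n : Int) : Int := if n == 0 then 1 else pvDcLoop n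

-- for i in range(1, length): early 'return True' ported as List.any.
-- i ranges over [1, length), so i >= 0 and Python's 10 ** i is exactly 10 ^ i.toNat.
def isPreSquareNumber (n : Int) : Bool :=
  let length := digitCount n
  (PySem.List.pyRange 1 length 1).any (fun i =>
    PySem.Int.mod n (10 ^ i.toNat) == (PySem.Int.floordiv n (10 ^ i.toNat)) ^ 2)

-- ===== PORT B =====
-- while q > 1 and q % 10 == 0: q //= 10
def pvStrip (q : Int) : Int :=
  if h : 1 < q ∧ PySem.Int.mod q 10 = 0 then pvStrip (PySem.Int.floordiv q 10) else q
termination_by q.toNat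
decreasing_by
  rw [PySem.Int.floordiv_eq_ediv_of_pos (by norm_num)]
  have := Int.ediv_nonneg (a := q) (b := 10) (by omega) (by norm_num)
  have := Int.ediv_lt_of_lt_mul (a := q) (b := q) (c := 10) (by omega) (by nlinarith [h.1])
  omega

-- while u*u*u < n: … u += 1.  '1 ≤ u' is a totality guard only: the loop is
-- entered at u = 1 and u only increments, so it never changes the computation.
def pvRootLoop (u n : Int) : Bool :=
  if h : 1 ≤ u ∧ u * u * u < n then
    if PySem.Int.mod (n - u * u) u = 0 ∧
       PySem.Int.floordiv (n - u * u) u > u * u ∧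
       pvStrip (PySem.Int.floordiv (n - u * u) u) = 1
    then true
    else pvRootLoop (u + 1) n
  else false
termination_by (n - u).toNat
decreasing_by
  have hu : u ≤ u * u * u := by nlinarith [h.1]
  omega

def isPreSquareNumber_alt (n : Int) : Bool := pvRootLoop 1 n

-- ===== PRECONDITION & SPEC =====
def Spec_isPreSquareNumber (n : Int) (out : Bool) : Prop := out = isPreSquareNumber_alt n
instance (n : Int) (out : Bool) : Decidable (Spec_isPreSquareNumber n out) := by unfold Spec_isPreSquareNumber; infer_instance

-- ===== CLAIM (what is proved, stated in full; the proofs are below) =====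
def Claim_equal_isPreSquareNumber : Prop := ∀ (n : Int), Dom_isPreSquareNumber n → Spec_isPreSquareNumber n (isPreSquareNumber n)

-- ===== LEMMAS AND PROOFS =====

lemma pvDcLoop_nonneg (n : Int) : 0 ≤ pvDcLoop n := by
  induction n using pvDcLoop.induct with
  | case1 n h ih => rw [pvDcLoop]; simp only [dif_pos h]; omega
  | case2 n h => rw [pvDcLoop]; simp [h]

lemma pvDcLoop_iff (n : Int) : ∀ k : Nat, ((k : Int) < pvDcLoop n ↔ 0 < n / 10 ^ k) := by
  induction n using pvDcLoop.induct with
  | case1 n h ih =>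
    intro k
    rw [pvDcLoop]
    simp only [dif_pos h]
    rw [PySem.Int.floordiv_eq_ediv_of_pos (by norm_num : (0:Int) < 10)] at ih ⊢
    cases k with
    | zero =>
      have hnn := pvDcLoop_nonneg (n / 10)
      simp only [pow_zero, Int.ediv_one, Nat.cast_zero]
      constructor
      · intro _; exact h
      · intro _; omega
    | succ j =>
      have hdd : n / 10 / 10 ^ j = n / 10 ^ (j + 1) := by
        rw [Int.ediv_ediv_of_nonneg (by norm_num : (0:Int) ≤ 10), ← pow_succ']
      rcases ih j with ⟨h1, h2⟩
      rw [hdd] at h1 h2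
      push_cast
      constructor
      · intro hk; exact h1 (by omega)
      · intro ht; have := h2 ht; omega
  | case2 n h =>
    intro k
    rw [pvDcLoop]
    simp only [dif_neg h]
    have hle : n / 10 ^ k ≤ 0 := by
      have := Int.ediv_le_ediv (pow_pos (by norm_num : (0:Int) < 10) k) (le_of_not_gt h)
      simpa using this
    constructor
    · intro hk; exact absurd hk (by omega)
    · intro ht; exact absurd ht (by omega)

lemma pvCubeMono (u v : Int) (h1 : 1 ≤ u) (h : u ≤ v) : u * u * u ≤ v * v * v := by
  have h2 : u * u ≤ v * v := by nlinarith
  nlinarith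

lemma pvStrip_pow : ∀ k : Nat, pvStrip ((10:Int) ^ k) = 1 := by
  intro k
  induction k with
  | zero => rw [pvStrip]; norm_num
  | succ j ih =>
    have hp : (0:Int) < 10 ^ j := pow_pos (by norm_num) j
    have h1 : (1:Int) < 10 ^ (j + 1) := by rw [pow_succ]; nlinarith
    have h2 : PySem.Int.mod ((10:Int) ^ (j + 1)) 10 = 0 := by
      rw [PySem.Int.mod_eq_emod_of_pos (by norm_num), pow_succ]
      exact Int.mul_emod_left _ _
    have h3 : PySem.Int.floordiv ((10:Int) ^ (j + 1)) 10 = 10 ^ j := by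
      rw [PySem.Int.floordiv_eq_ediv_of_pos (by norm_num), pow_succ]
      exact Int.mul_ediv_cancel _ (by norm_num)
    rw [pvStrip, dif_pos ⟨h1, h2⟩, h3]
    exact ih

lemma pvStrip_eq_one (q : Int) (hq : pvStrip q = 1) : ∃ k : Nat, q = 10 ^ k := by
  induction q using pvStrip.induct with
  | case1 q h ih =>
    rw [pvStrip, dif_pos h] at hq
    obtain ⟨k, hk⟩ := ih hq
    refine ⟨k + 1, ?_⟩
    rw [PySem.Int.floordiv_eq_ediv_of_pos (by norm_num)] at hk
    have hm : q % 10 = 0 := by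
      have := h.2
      rwa [PySem.Int.mod_eq_emod_of_pos (by norm_num)] at this
    have hsum := Int.ediv_add_emod q 10
    rw [hk, hm] at hsum
    rw [pow_succ]
    linarith
  | case2 q h =>
    rw [pvStrip, dif_neg h] at hq
    exact ⟨0, by simpa using hq⟩

-- loop invariant for B: pvRootLoop u n searches the candidate roots v ≥ u
lemma pvRootLoop_iff (n : Int) : ∀ (m : Nat) (u : Int), 1 ≤ u → (n - u).toNat ≤ m →
    (pvRootLoop u n = true ↔ ∃ v : Int, u ≤ v ∧ v * v * v < n ∧
      (n - v * v) % v = 0 ∧ (n - v * v) / v > v * v ∧ pvStrip ((n - v * v) / v) = 1) := by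
  intro m
  induction m with
  | zero =>
    intro u hu hm
    have hn : n ≤ u := by omega
    have hng : ¬ (1 ≤ u ∧ u * u * u < n) := by
      rintro ⟨_, hlt⟩; nlinarith
    rw [pvRootLoop, dif_neg hng]
    constructor
    · intro h; exact absurd h (by simp)
    · rintro ⟨v, hv, hlt, -⟩
      have := pvCubeMono u v hu hv
      omega
  | succ m ih =>
    intro u hu hm
    by_cases hlt : u * u * u < n
    · have hun : u < n := by nlinarith
      rw [pvRootLoop, dif_pos ⟨hu, hlt⟩]
      have hconv :
          (PySem.Int.mod (n - u * u) u = 0 ∧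
           PySem.Int.floordiv (n - u * u) u > u * u ∧
           pvStrip (PySem.Int.floordiv (n - u * u) u) = 1) ↔
          ((n - u * u) % u = 0 ∧ (n - u * u) / u > u * u ∧ pvStrip ((n - u * u) / u) = 1) := by
        rw [PySem.Int.mod_eq_emod_of_pos (by omega), PySem.Int.floordiv_eq_ediv_of_pos (by omega)]
      by_cases hc : (n - u * u) % u = 0 ∧ (n - u * u) / u > u * u ∧ pvStrip ((n - u * u) / u) = 1
      · rw [if_pos (hconv.mpr hc)]
        exact ⟨fun _ => ⟨u, le_rfl, hlt, hc.1, hc.2.1, hc.2.2⟩, fun _ => rfl⟩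
      · rw [if_neg (fun h => hc (hconv.mp h))]
        rw [ih (u + 1) (by omega) (by omega)]
        constructor
        · rintro ⟨v, hv, rest⟩; exact ⟨v, by omega, rest⟩
        · rintro ⟨v, hv, h3, h4, h5, h6⟩
          rcases eq_or_lt_of_le hv with heq | hgt
          · exact absurd ⟨h4, h5, h6⟩ (heq ▸ hc)
          · exact ⟨v, by omega, h3, h4, h5, h6⟩
    · rw [pvRootLoop, dif_neg (by rintro ⟨_, h⟩; exact hlt h)]
      constructor
      · intro h; exact absurd h (by simp)
      · rintro ⟨v, hv, hv3, -⟩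
        have := pvCubeMono u v hu hv
        omega

-- ===== VERDICT (by name: the statement is the Claim_ definition above) =====
theorem isPreSquareNumber_spec : Claim_equal_isPreSquareNumber := by
  intro n _
  unfold Spec_isPreSquareNumber isPreSquareNumber isPreSquareNumber_alt
  rw [Bool.eq_iff_iff, List.any_eq_true,
      pvRootLoop_iff n (n - 1).toNat 1 le_rfl le_rfl]
  constructor
  · -- A's split witness gives B's root witness
    rintro ⟨i, hmem, hf⟩
    rw [PySem.List.mem_pyRange_one] at hmem
    obtain ⟨hi1, hid⟩ := hmem
    have hn0 : n ≠ 0 := by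
      rintro rfl
      simp [digitCount] at hid
      omega
    have hdc : digitCount n = pvDcLoop n := by simp [digitCount, hn0]
    set k := i.toNat with hk
    have hik : (k : Int) = i := Int.toNat_of_nonneg (by omega)
    have hP : (0:Int) < 10 ^ k := pow_pos (by norm_num) k
    have hpos : 0 < n / 10 ^ k := (pvDcLoop_iff n k).mp (by rw [hik]; omega)
    set u := n / 10 ^ k with hu
    rw [PySem.Int.mod_eq_emod_of_pos hP, PySem.Int.floordiv_eq_ediv_of_pos hP,
        beq_iff_eq] at hf
    have hsum := Int.ediv_add_emod n (10 ^ k)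
    have hn' : n = 10 ^ k * u + u * u := by rw [← hsum, hf, pow_two]
    have hlt : u * u < 10 ^ k := by
      have := Int.emod_lt_of_pos n hP
      rw [hf, pow_two] at this
      exact this
    have hdivu : (n - u * u) / u = 10 ^ k := by
      have : n - u * u = 10 ^ k * u := by linarith
      rw [this, mul_comm, Int.mul_ediv_cancel_left _ (by omega)]
    refine ⟨u, by omega, by nlinarith, ?_, ?_, ?_⟩
    · have : n - u * u = 10 ^ k * u := by linarith
      rw [this, Int.mul_emod_left]
    · rw [hdivu]; exact hlt
    · rw [hdivu]; exact pvStrip_pow k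
  · -- B's root witness gives A's split witness
    rintro ⟨v, hv1, hv3, hm, hq, hs⟩
    obtain ⟨k, hkq⟩ := pvStrip_eq_one _ hs
    have hsum := Int.ediv_add_emod (n - v * v) v
    rw [hm, hkq] at hsum
    have hn' : n = v * v + 10 ^ k * v := by linarith
    have hvv1 : 1 ≤ v * v := by nlinarith
    rw [hkq] at hq
    have hk1 : 1 ≤ k := by
      by_contra h
      interval_cases k
      simp at hq
      omega
    have hP : (0:Int) < 10 ^ k := pow_pos (by norm_num) k
    have hdiv : n / 10 ^ k = v := by
      rw [hn', Int.add_mul_ediv_left _ _ (by omega),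
          Int.ediv_eq_zero_of_lt (by nlinarith) hq, zero_add]
    have hmod : n % 10 ^ k = v * v := by
      rw [hn', Int.add_mul_emod_self_left, Int.emod_eq_of_lt (by nlinarith) hq]
    have hnpos : 0 < n := by nlinarith
    have hne : n ≠ 0 := by omega
    have hdc : digitCount n = pvDcLoop n := by simp [digitCount, hne]
    refine ⟨(k : Int), ?_, ?_⟩
    · rw [PySem.List.mem_pyRange_one, hdc]
      refine ⟨by exact_mod_cast hk1, (pvDcLoop_iff n k).mpr (by omega)⟩
    · have htn : ((k : Int)).toNat = k := Int.toNat_natCast k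
      rw [htn, PySem.Int.mod_eq_emod_of_pos hP, PySem.Int.floordiv_eq_ediv_of_pos hP,
          beq_iff_eq, hdiv, hmod, pow_two]
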